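-- pv_equiv track=rewrite | github.com/huzzle-app/coding-rl-envs | python/latticeforge/latticeforge/dependency.py | parallel_execution_groups
-- ===== SOURCE A (Python) =====
-- from collections import defaultdict, deque
-- from typing import Dict, Iterable, List, Sequence, Set, Tuple
--
-- def topological_sort(nodes: Sequence[str], edges: Iterable[Tuple[str, str]]) -> List[str]:
--     graph: Dict[str, List[str]] = defaultdict(list)
--     indegree: Dict[str, int] = {node: 0 for node in nodes}
--
--     for source, target in edges:
--         graph[source].append(target)
--         indegree[target] = indegree.get(target, 0) + 1
--         indegree.setdefault(source, 0)
--
--     queue = deque(sorted(node for node, degree in indegree.items() if degree == 0))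
--     ordered: List[str] = []
--
--     while queue:
--         node = queue.popleft()
--         ordered.append(node)
--         for neighbor in sorted(graph[node]):
--             indegree[neighbor] -= 1
--             if indegree[neighbor] == 0:
--                 queue.append(neighbor)
--
--     if len(ordered) != len(indegree):
--         raise ValueError("dependency cycle detected")
--
--     return ordered
--
-- def parallel_execution_groups(
--     nodes: Sequence[str], edges: Iterable[Tuple[str, str]]
-- ) -> List[Set[str]]:
--     ordered = topological_sort(nodes, edges)
--     edge_list = list(edges)
--     children: Dict[str, List[str]] = defaultdict(list)
--     has_parent: Set[str] = set()
--     for src, tgt in edge_list: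
--         children[src].append(tgt)
--         has_parent.add(tgt)
--
--     level: Dict[str, int] = {}
--     queue = deque()
--     for node in ordered:
--         if node not in has_parent:
--             level[node] = 0
--             queue.append(node)
--
--     while queue:
--         current = queue.popleft()
--         for child in children[current]:
--             if child not in level:
--                 level[child] = level[current] + 1
--                 queue.append(child)
--
--     for node in ordered:
--         if node not in level:
--             level[node] = 0
--
--     groups: Dict[int, Set[str]] = defaultdict(set)
--     for node, lvl in level.items():
--         groups[lvl].add(node)
--     return [groups[i] for i in range(max(groups.keys()) + 1)] if groups else []
-- ===== SOURCE B (Python) =====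
-- from collections import defaultdict, deque
-- from typing import Dict, Iterable, List, Sequence, Set, Tuple
--
--
-- def topological_sort(nodes: Sequence[str], edges: Iterable[Tuple[str, str]]) -> List[str]:
--     graph: Dict[str, List[str]] = defaultdict(list)
--     indegree: Dict[str, int] = {node: 0 for node in nodes}
--
--     for source, target in edges:
--         graph[source].append(target)
--         indegree[target] = indegree.get(target, 0) + 1
--         indegree.setdefault(source, 0)
--
--     queue = deque(sorted(node for node, degree in indegree.items() if degree == 0))
--     ordered: List[str] = []
--
--     while queue:
--         node = queue.popleft()
--         ordered.append(node)
--         for neighbor in sorted(graph[node]):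
--             indegree[neighbor] -= 1
--             if indegree[neighbor] == 0:
--                 queue.append(neighbor)
--
--     if len(ordered) != len(indegree):
--         raise ValueError("dependency cycle detected")
--
--     return ordered
--
--
-- def parallel_execution_groups(
--     nodes: Sequence[str], edges: Iterable[Tuple[str, str]]
-- ) -> List[Set[str]]:
--     # Level-synchronous frontier sweep: each whole frontier becomes one group,
--     # with no per-node level map and no bucketing pass.
--     ordered = topological_sort(nodes, edges)
--     children: Dict[str, List[str]] = {}
--     seen: Set[str] = set()
--     for src, tgt in list(edges):
--         children.setdefault(src, []).append(tgt)
--         seen.add(tgt)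
--     frontier = [n for n in ordered if n not in seen]  # parentless nodes, in order
--     seen = set(frontier)
--     groups: List[Set[str]] = []
--     while frontier:
--         groups.append(set(frontier))
--         nxt: List[str] = []
--         for node in frontier:
--             for child in children.get(node, []):
--                 if child not in seen:
--                     seen.add(child)
--                     nxt.append(child)
--         frontier = nxt
--     return groups
-- ===== Notes on version B (the rewrite author's own statement) =====
-- stated objective: alternative
-- what changed: Replaces A's node-at-a-time FIFO BFS that fills a node->level dict and then buckets it through a defaultdict keyed by level (plus a max/range rebuild) with a level-synchronous frontier sweep that emits each whole frontier directly as the next group, keeping only a seen-set and no level or group dictionaries.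
import Mathlib
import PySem

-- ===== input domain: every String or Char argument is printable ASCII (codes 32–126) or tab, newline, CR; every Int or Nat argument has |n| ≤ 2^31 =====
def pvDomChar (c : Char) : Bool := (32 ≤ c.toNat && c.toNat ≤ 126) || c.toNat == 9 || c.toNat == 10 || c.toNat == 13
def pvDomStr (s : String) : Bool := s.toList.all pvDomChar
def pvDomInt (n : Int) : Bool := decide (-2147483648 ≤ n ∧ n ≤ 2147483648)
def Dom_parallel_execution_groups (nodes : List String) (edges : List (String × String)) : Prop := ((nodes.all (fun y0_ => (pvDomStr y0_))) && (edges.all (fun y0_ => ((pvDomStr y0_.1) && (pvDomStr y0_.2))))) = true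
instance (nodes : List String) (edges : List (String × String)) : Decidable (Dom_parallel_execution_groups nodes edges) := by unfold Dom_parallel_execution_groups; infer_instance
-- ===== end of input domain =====

-- B replaces A's FIFO-queue BFS + node→level dict + level-keyed bucketing dict by a
-- level-synchronous frontier sweep emitting each frontier directly as a group (objective: alternative).

-- ===== PORT A =====
-- generic counting / fold lemmas used by the termination proofs below
theorem pvCountSplit {α : Type} (U : List α) (p q : α → Bool) (h : ∀ x, q x = true → p x = true) :
    (U.filter p).length = (U.filter q).length + (U.filter (fun x => p x && !q x)).length := by
  induction U with
  | nil => simp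
  | cons a t ih =>
      by_cases hq : q a = true
      · simp [hq, h a hq, ih]; omega
      · simp only [Bool.not_eq_true] at hq
        by_cases hp : p a = true
        · simp [hp, hq, ih]; omega
        · simp [hp, hq, ih]

-- package about one 'if contained: skip else: mark and append' fold (shared by both ports' loops)
theorem pvFoldCore {σ α : Type} [BEq α] [LawfulBEq α]
    (cont : σ → α → Bool) (upd : σ → α → σ)
    (hc : ∀ s x y, cont (upd s x) y = (y == x || cont s y)) :
    ∀ (cs : List α) (s : σ) (acc : List α),
      ∃ news,
        (cs.foldl (fun st child => if cont st.1 child then st else (upd st.1 child, st.2 ++ [child])) (s, acc)).2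
          = acc ++ news ∧
        news.Nodup ∧
        (∀ x, cont s x = true →
          cont (cs.foldl (fun st child => if cont st.1 child then st else (upd st.1 child, st.2 ++ [child])) (s, acc)).1 x = true) ∧
        (∀ x ∈ news, x ∈ cs ∧ cont s x = false ∧
          cont (cs.foldl (fun st child => if cont st.1 child then st else (upd st.1 child, st.2 ++ [child])) (s, acc)).1 x = true) ∧
        (news = [] → (cs.foldl (fun st child => if cont st.1 child then st else (upd st.1 child, st.2 ++ [child])) (s, acc)).1 = s) ∧
        (∀ c ∈ cs,
          cont (cs.foldl (fun st child => if cont st.1 child then st else (upd st.1 child, st.2 ++ [child])) (s, acc)).1 c = true) := by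
  intro cs
  induction cs with
  | nil => intro s acc; exact ⟨[], by simp⟩
  | cons c cs ih =>
      intro s acc
      by_cases hcc : cont s c = true
      · obtain ⟨news, h1, h2, h3, h4, h5, h6⟩ := ih s acc
        refine ⟨news, ?_, h2, ?_, ?_, ?_, ?_⟩
        · simpa [hcc] using h1
        · intro x hx; simpa [hcc] using h3 x hx
        · intro x hx; obtain ⟨m1, m2, m3⟩ := h4 x hx
          exact ⟨List.mem_cons_of_mem _ m1, m2, by simpa [hcc] using m3⟩
        · intro hn; simpa [hcc] using h5 hn
        · intro d hd
          rcases List.mem_cons.1 hd with rfl | hd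
          · simpa [hcc] using h3 d hcc
          · simpa [hcc] using h6 d hd
      · simp only [Bool.not_eq_true] at hcc
        obtain ⟨news, h1, h2, h3, h4, h5, h6⟩ := ih (upd s c) (acc ++ [c])
        have hstep : ((c :: cs).foldl (fun st child => if cont st.1 child then st else (upd st.1 child, st.2 ++ [child])) (s, acc))
            = cs.foldl (fun st child => if cont st.1 child then st else (upd st.1 child, st.2 ++ [child])) (upd s c, acc ++ [c]) := by
          simp [hcc]
        refine ⟨c :: news, ?_, ?_, ?_, ?_, ?_, ?_⟩
        · rw [hstep, h1]; simp
        · refine List.nodup_cons.2 ⟨fun hmem => ?_, h2⟩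
          have := (h4 c hmem).2.1
          rw [hc] at this; simp at this
        · intro x hx; rw [hstep]; exact h3 x (by rw [hc, hx, Bool.or_true])
        · intro x hx
          rcases List.mem_cons.1 hx with rfl | hx
          · refine ⟨List.mem_cons_self, hcc, ?_⟩
            rw [hstep]; exact h3 x (by rw [hc]; simp)
          · obtain ⟨m1, m2, m3⟩ := h4 x hx
            have : cont s x = false := by
              rcases hcs : cont s x with _ | _
              · rfl
              · rw [hc, hcs, Bool.or_true] at m2; cases m2
            exact ⟨List.mem_cons_of_mem _ m1, this, by rw [hstep]; exact m3⟩
        · intro hfalse; cases hfalse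
        · intro d hd
          rcases List.mem_cons.1 hd with rfl | hd
          · rw [hstep]; exact h3 d (by rw [hc]; simp)
          · rw [hstep]; exact h6 d hd

-- the same fold with a non-empty accumulator only prepends it
theorem pvFoldShift {σ α : Type} (cont : σ → α → Bool) (upd : σ → α → σ) :
    ∀ (cs : List α) (s : σ) (acc : List α),
      cs.foldl (fun st child => if cont st.1 child then st else (upd st.1 child, st.2 ++ [child])) (s, acc)
        = ((cs.foldl (fun st child => if cont st.1 child then st else (upd st.1 child, st.2 ++ [child])) (s, [])).1,
           acc ++ (cs.foldl (fun st child => if cont st.1 child then st else (upd st.1 child, st.2 ++ [child])) (s, [])).2) := by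
  intro cs
  induction cs with
  | nil => intro s acc; simp
  | cons c cs ih =>
      intro s acc
      by_cases hcc : cont s c = true
      · simp only [List.foldl_cons, hcc, if_true]; exact ih s acc
      · simp only [List.foldl_cons, hcc, Bool.false_eq_true, if_false]
        rw [ih (upd s c) (acc ++ [c])]
        conv_rhs => rw [ih (upd s c) ([] ++ [c])]
        simp

theorem pvSetContainsAdd (s : PySem.Set String) (x y : String) :
    PySem.Set.contains (PySem.Set.add s x) y = (y == x || PySem.Set.contains s y) := by
  rcases hm : (y == x || PySem.Set.contains s y) with _ | _
  · simp only [Bool.or_eq_false_iff] at hm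
    have h1 : y ≠ x := by simpa using hm.1
    have h2 : y ∉ s := by
      intro hy
      have ht := (PySem.Set.contains_iff s y).2 hy
      rw [hm.2] at ht; cases ht
    rcases hc : PySem.Set.contains (PySem.Set.add s x) y with _ | _
    · rfl
    · have := (PySem.Set.contains_iff _ y).1 hc
      rcases (PySem.Set.mem_add s x y).1 this with h | h
      · exact absurd h h2
      · exact absurd h h1
  · simp only [Bool.or_eq_true] at hm
    apply (PySem.Set.contains_iff _ y).2
    apply (PySem.Set.mem_add s x y).2
    rcases hm with h | h
    · exact Or.inr (by simpa using h)
    · exact Or.inl ((PySem.Set.contains_iff s y).1 h)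

theorem pvGetDValuesSub {ν : Type} (d : PySem.Dict String (List ν)) (k : String) :
    ∀ y ∈ d.getD k [], y ∈ d.values.flatten := by
  intro y hy
  rcases hg : d.get? k with _ | v
  · rw [PySem.Dict.getD_of_get?_eq_none _ _ hg] at hy; simp at hy
  · rw [PySem.Dict.getD_of_get?_eq_some _ _ hg] at hy
    have hit := PySem.Dict.mem_items_of_get?_eq_some _ hg
    have hv : v ∈ d.values := by
      simp [PySem.Dict.values]; exact ⟨k, hit⟩
    exact List.mem_flatten_of_mem hv hy


-- topological_sort: build graph (defaultdict list-append) and indegree, then Kahn's queue loop.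
def pvGraphInd (nodes : List String) (edges : List (String × String)) :
    PySem.Dict String (List String) × PySem.Dict String Int :=
  edges.foldl
    (fun st e =>
      (st.1.modify e.1 [] (fun l => l ++ [e.2]),
       (st.2.insert e.2 (st.2.getD e.2 0 + 1)).setdefault e.1 0))
    (PySem.Dict.empty, nodes.foldl (fun d n => d.insert n 0) PySem.Dict.empty)

-- the 'while queue' loop of topological_sort; fuel only makes the recursion total
-- (the Python loop pops one node per iteration and every node is enqueued at most twice,
-- so the generous fuel below is never exhausted; none also encodes the ValueError path).
def pvKahnLoop (graph : PySem.Dict String (List String)) :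
    Nat → List String → PySem.Dict String Int → List String →
    Option (List String × PySem.Dict String Int)
  | _, [], ind, ordered => some (ordered, ind)
  | 0, _ :: _, _, _ => none
  | fuel + 1, node :: rest, ind, ordered =>
      let st := (PySem.List.sorted (graph.getD node []) (fun x => x) false).foldl
          (fun (st : PySem.Dict String Int × List String) nb =>
            let ind' := st.1.insert nb (st.1.getD nb 0 - 1)
            if ind'.getD nb 0 == 0 then (ind', st.2 ++ [nb]) else (ind', st.2))
          (ind, [])
      pvKahnLoop graph fuel (rest ++ st.2) st.1 (ordered ++ [node])

-- none = the 'dependency cycle detected' ValueError (or exhausted fuel, which never happens)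
def pvTopoSort (nodes : List String) (edges : List (String × String)) : Option (List String) :=
  let gi := pvGraphInd nodes edges
  let queue := PySem.List.sorted ((gi.2.items.filter (fun p => p.2 == 0)).map (fun p => p.1)) (fun x => x) false
  match pvKahnLoop gi.1 ((nodes.length + edges.length + 1) * (nodes.length + edges.length + 1)) queue gi.2 [] with
  | none => none
  | some (ordered, indF) => if ordered.length = indF.items.length then some ordered else none

-- children[src].append(tgt) / has_parent.add(tgt) loop (shared text in A and B)
def pvChildrenSeen (edges : List (String × String)) :
    PySem.Dict String (List String) × PySem.Set String :=
  edges.foldl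
    (fun st e => (st.1.modify e.1 [] (fun l => l ++ [e.2]), PySem.Set.add st.2 e.2))
    (PySem.Dict.empty, PySem.Set.empty)

-- body of one BFS pop: 'for child in children[current]: if child not in level: …'
def pvPushA (children : PySem.Dict String (List String)) (current : String)
    (st : PySem.Dict String Int × List String) : PySem.Dict String Int × List String :=
  (children.getD current []).foldl
    (fun st child =>
      if st.1.contains child then st
      else (st.1.insert child (st.1.getD current 0 + 1), st.2 ++ [child]))
    st

-- the pvFoldCore package, specialised to one BFS pop of port A
theorem pvPushACore (children : PySem.Dict String (List String)) (current : String)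
    (lv : PySem.Dict String Int) :
    ∃ news,
      (pvPushA children current (lv, [])).2 = news ∧
      news.Nodup ∧
      (∀ x, lv.contains x = true → (pvPushA children current (lv, [])).1.contains x = true) ∧
      (∀ x ∈ news, x ∈ children.values.flatten ∧ lv.contains x = false ∧
        (pvPushA children current (lv, [])).1.contains x = true) ∧
      (news = [] → (pvPushA children current (lv, [])).1 = lv) ∧
      (∀ c ∈ children.getD current [], (pvPushA children current (lv, [])).1.contains c = true) := by
  obtain ⟨news, h1, h2, h3, h4, h5, h6⟩ :=
    pvFoldCore (fun (d : PySem.Dict String Int) c => d.contains c)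
      (fun d c => d.insert c (d.getD current 0 + 1))
      (fun s x y => PySem.Dict.contains_insert s x y _)
      (children.getD current []) lv []
  exact ⟨news, by simpa using h1, h2, h3,
    fun x hx => ⟨pvGetDValuesSub children current x (h4 x hx).1, (h4 x hx).2.1, (h4 x hx).2.2⟩,
    h5, h6⟩

theorem pvPushA_term (children : PySem.Dict String (List String)) (current : String)
    (level : PySem.Dict String Int) :
    2 * ((children.values.flatten).filter (fun c => !((pvPushA children current (level, [])).1.contains c))).length
      + (pvPushA children current (level, [])).2.length
    ≤ 2 * ((children.values.flatten).filter (fun c => !(level.contains c))).length := by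
  obtain ⟨news, h1, h2, h3, h4, h5, h6⟩ := pvPushACore children current level
  have himp : ∀ x, (!((pvPushA children current (level, [])).1.contains x)) = true →
      (!(level.contains x)) = true := by
    intro x hx
    rcases hl : level.contains x with _ | _
    · rfl
    · rw [h3 x hl] at hx; cases hx
  have hsplit := pvCountSplit (children.values.flatten)
    (fun c => !(level.contains c)) (fun c => !((pvPushA children current (level, [])).1.contains c)) himp
  have hsub : news ⊆ (children.values.flatten).filter
      (fun x => (!(level.contains x)) && !(!((pvPushA children current (level, [])).1.contains x))) := by
    intro x hx
    obtain ⟨mU, mf, mt⟩ := h4 x hx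
    refine List.mem_filter.2 ⟨mU, ?_⟩
    rw [mf, mt]; rfl
  have hlen := (List.Nodup.subperm h2 hsub).length_le
  simp only [] at hsplit
  rw [h1]
  omega

theorem pvPushA_nil (children : PySem.Dict String (List String)) (current : String)
    (level : PySem.Dict String Int)
    (h : (pvPushA children current (level, [])).2 = []) :
    (pvPushA children current (level, [])).1 = level := by
  obtain ⟨news, h1, h2, h3, h4, h5, h6⟩ := pvPushACore children current level
  exact h5 (by rw [← h1, h])

-- the 'while queue' BFS loop of A
def pvBfsA (children : PySem.Dict String (List String)) :
    List String → PySem.Dict String Int → PySem.Dict String Int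
  | [], level => level
  | current :: rest, level =>
      let st := pvPushA children current (level, [])
      pvBfsA children (rest ++ st.2) st.1
termination_by queue level =>
  2 * ((children.values.flatten).filter (fun c => !(level.contains c))).length + queue.length
decreasing_by
  rcases h : (pvPushA children current (level, [])).2 with _ | ⟨a, tl⟩
  · have := pvPushA_nil children current level h
    simp only [this, List.append_nil, List.length_cons]
    omega
  · have h1 := pvPushA_term children current level
    rw [h] at h1
    simp only [List.length_append, List.length_cons] at *
    omega

def parallel_execution_groups (nodes : List String) (edges : List (String × String)) : List (List String) :=
  match pvTopoSort nodes edges with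
  | none => []   -- Python raises ValueError on these inputs (excluded by Pre_)
  | some ordered =>
      let cs := pvChildrenSeen edges
      -- 'for node in ordered: if node not in has_parent: level[node]=0; queue.append(node)'
      let lq := ordered.foldl
          (fun (st : PySem.Dict String Int × List String) n =>
            if PySem.Set.contains cs.2 n then st else (st.1.insert n 0, st.2 ++ [n]))
          (PySem.Dict.empty, [])
      let level1 := pvBfsA cs.1 lq.2 lq.1
      -- 'for node in ordered: if node not in level: level[node] = 0'
      let level2 := ordered.foldl (fun lv n => if lv.contains n then lv else lv.insert n 0) level1
      -- 'for node, lvl in level.items(): groups[lvl].add(node)'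
      let groups := level2.items.foldl
          (fun (g : PySem.Dict Int (PySem.Set String)) p =>
            g.insert p.2 (PySem.Set.add (g.getD p.2 PySem.Set.empty) p.1))
          PySem.Dict.empty
      if groups.items.length = 0 then []
      else
        match PySem.List.max? groups.keys (fun x => x) with
        | none => []
        | some m => (PySem.List.pyRange 0 (m + 1) 1).map (fun i => (groups.getD i PySem.Set.empty : List String))

-- ===== PORT B =====
-- inner 'for child in children.get(node, []): if child not in seen: seen.add; nxt.append'
def pvPushB (children : PySem.Dict String (List String))
    (st : PySem.Set String × List String) (node : String) : PySem.Set String × List String :=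
  (children.getD node []).foldl
    (fun st child =>
      if PySem.Set.contains st.1 child then st
      else (PySem.Set.add st.1 child, st.2 ++ [child]))
    st

-- the pvFoldCore package, specialised to one node expansion of port B
theorem pvPushBCore (children : PySem.Dict String (List String)) (node : String)
    (seen : PySem.Set String) :
    ∃ news,
      (pvPushB children (seen, []) node).2 = news ∧
      news.Nodup ∧
      (∀ x, PySem.Set.contains seen x = true → PySem.Set.contains (pvPushB children (seen, []) node).1 x = true) ∧
      (∀ x ∈ news, x ∈ children.values.flatten ∧ PySem.Set.contains seen x = false ∧
        PySem.Set.contains (pvPushB children (seen, []) node).1 x = true) ∧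
      (news = [] → (pvPushB children (seen, []) node).1 = seen) := by
  obtain ⟨news, h1, h2, h3, h4, h5, h6⟩ :=
    pvFoldCore (fun (s : PySem.Set String) c => PySem.Set.contains s c) PySem.Set.add
      (fun s x y => pvSetContainsAdd s x y)
      (children.getD node []) seen []
  exact ⟨news, by exact h1, h2, h3,
    fun x hx => ⟨pvGetDValuesSub children node x (h4 x hx).1, (h4 x hx).2.1, (h4 x hx).2.2⟩, h5⟩

theorem pvPushBShift (children : PySem.Dict String (List String)) (s : PySem.Set String)
    (acc : List String) (n : String) :
    pvPushB children (s, acc) n = ((pvPushB children (s, []) n).1, acc ++ (pvPushB children (s, []) n).2) := by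
  exact pvFoldShift (fun (s : PySem.Set String) c => PySem.Set.contains s c) PySem.Set.add
    (children.getD n []) s acc

theorem pvPassBShift (children : PySem.Dict String (List String)) :
    ∀ (fr : List String) (s : PySem.Set String) (acc : List String),
      fr.foldl (pvPushB children) (s, acc)
        = ((fr.foldl (pvPushB children) (s, [])).1, acc ++ (fr.foldl (pvPushB children) (s, [])).2) := by
  intro fr
  induction fr with
  | nil => intro s acc; simp
  | cons n fr ih =>
      intro s acc
      simp only [List.foldl_cons]
      rw [pvPushBShift children s acc n]
      rw [ih (pvPushB children (s, []) n).1 (acc ++ (pvPushB children (s, []) n).2)]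
      conv_rhs => rw [show pvPushB children (s, []) n
        = ((pvPushB children (s, []) n).1, (pvPushB children (s, []) n).2) from rfl]
      rw [ih (pvPushB children (s, []) n).1 ((pvPushB children (s, []) n).2)]
      simp

theorem pvPassBCore (children : PySem.Dict String (List String)) :
    ∀ (fr : List String) (seen : PySem.Set String),
      ∃ news,
        (fr.foldl (pvPushB children) (seen, [])).2 = news ∧
        news.Nodup ∧
        (∀ x, PySem.Set.contains seen x = true →
          PySem.Set.contains (fr.foldl (pvPushB children) (seen, [])).1 x = true) ∧
        (∀ x ∈ news, x ∈ children.values.flatten ∧ PySem.Set.contains seen x = false ∧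
          PySem.Set.contains (fr.foldl (pvPushB children) (seen, [])).1 x = true) ∧
        (news = [] → (fr.foldl (pvPushB children) (seen, [])).1 = seen) := by
  intro fr
  induction fr with
  | nil => intro seen; exact ⟨[], by simp⟩
  | cons n fr ih =>
      intro seen
      obtain ⟨ns1, g1, g2, g3, g4, g5⟩ := pvPushBCore children n seen
      obtain ⟨ns2, k1, k2, k3, k4, k5⟩ := ih (pvPushB children (seen, []) n).1
      have hstep : (n :: fr).foldl (pvPushB children) (seen, [])
          = ((fr.foldl (pvPushB children) ((pvPushB children (seen, []) n).1, [])).1,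
             ns1 ++ (fr.foldl (pvPushB children) ((pvPushB children (seen, []) n).1, [])).2) := by
        simp only [List.foldl_cons]
        conv_lhs => rw [show pvPushB children (seen, []) n
          = ((pvPushB children (seen, []) n).1, ns1) from by rw [← g1]]
        exact pvPassBShift children fr _ ns1
      refine ⟨ns1 ++ ns2, ?_, ?_, ?_, ?_, ?_⟩
      · rw [hstep, k1]
      · refine List.Nodup.append g2 k2 ?_
        intro x hx1 hx2
        have h1 := (g4 x hx1).2.2
        have h2 := (k4 x hx2).2.1
        rw [h1] at h2; cases h2
      · intro x hx
        rw [hstep]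
        exact k3 x (g3 x hx)
      · intro x hx
        rcases List.mem_append.1 hx with hx | hx
        · obtain ⟨mU, mf, mt⟩ := g4 x hx
          exact ⟨mU, mf, by rw [hstep]; exact k3 x mt⟩
        · obtain ⟨mU, mf, mt⟩ := k4 x hx
          refine ⟨mU, ?_, by rw [hstep]; exact mt⟩
          rcases hs : PySem.Set.contains seen x with _ | _
          · rfl
          · rw [g3 x hs] at mf; cases mf
      · intro hnil
        rcases List.append_eq_nil_iff.1 hnil with ⟨e1, e2⟩
        rw [hstep]
        have := k5 e2
        rw [this, g5 e1]

theorem pvPassB_term (children : PySem.Dict String (List String)) (frontier : List String)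
    (seen : PySem.Set String) :
    2 * ((children.values.flatten).filter (fun c => !(PySem.Set.contains (frontier.foldl (pvPushB children) (seen, [])).1 c))).length
      + (frontier.foldl (pvPushB children) (seen, [])).2.length
    ≤ 2 * ((children.values.flatten).filter (fun c => !(PySem.Set.contains seen c))).length := by
  obtain ⟨news, h1, h2, h3, h4, h5⟩ := pvPassBCore children frontier seen
  have himp : ∀ x, (!(PySem.Set.contains (frontier.foldl (pvPushB children) (seen, [])).1 x)) = true →
      (!(PySem.Set.contains seen x)) = true := by
    intro x hx
    rcases hl : PySem.Set.contains seen x with _ | _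
    · rfl
    · rw [h3 x hl] at hx; cases hx
  have hsplit := pvCountSplit (children.values.flatten)
    (fun c => !(PySem.Set.contains seen c))
    (fun c => !(PySem.Set.contains (frontier.foldl (pvPushB children) (seen, [])).1 c)) himp
  have hsub : news ⊆ (children.values.flatten).filter
      (fun x => (!(PySem.Set.contains seen x)) && !(!(PySem.Set.contains (frontier.foldl (pvPushB children) (seen, [])).1 x))) := by
    intro x hx
    obtain ⟨mU, mf, mt⟩ := h4 x hx
    refine List.mem_filter.2 ⟨mU, ?_⟩
    rw [mf, mt]; rfl
  have hlen := (List.Nodup.subperm h2 hsub).length_le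
  simp only [] at hsplit
  rw [h1]
  omega

theorem pvPassB_nil (children : PySem.Dict String (List String)) (frontier : List String)
    (seen : PySem.Set String)
    (h : (frontier.foldl (pvPushB children) (seen, [])).2 = []) :
    (frontier.foldl (pvPushB children) (seen, [])).1 = seen := by
  obtain ⟨news, h1, h2, h3, h4, h5⟩ := pvPassBCore children frontier seen
  exact h5 (by rw [← h1, h])

-- the 'while frontier' level-synchronous loop of B
def pvBfsB (children : PySem.Dict String (List String)) :
    List String → PySem.Set String → List (List String)
  | [], _ => []
  | current :: rest, seen =>
      let frontier := current :: rest
      let st := frontier.foldl (pvPushB children) (seen, [])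
      PySem.Set.ofList frontier :: pvBfsB children st.2 st.1
termination_by frontier seen =>
  2 * ((children.values.flatten).filter (fun c => !(PySem.Set.contains seen c))).length + frontier.length
decreasing_by
  rcases h : ((current :: rest).foldl (pvPushB children) (seen, [])).2 with _ | ⟨a, tl⟩
  · have := pvPassB_nil children (current :: rest) seen h
    simp only [this, List.length_nil, List.length_cons]
    omega
  · have h1 := pvPassB_term children (current :: rest) seen
    rw [h] at h1
    simp only [List.length_cons] at *
    omega

def parallel_execution_groups_alt (nodes : List String) (edges : List (String × String)) : List (List String) :=
  match pvTopoSort nodes edges with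
  | none => []   -- same ValueError path as A (Source B calls the same topological_sort)
  | some ordered =>
      let cs := pvChildrenSeen edges
      let frontier := ordered.filter (fun n => !(PySem.Set.contains cs.2 n))
      pvBfsB cs.1 frontier (PySem.Set.ofList frontier)

-- ===== PRECONDITION & SPEC =====
-- helpers for Pre_: the node universe, edge successors, and a step-iterated reachability closure
def pvAllNodes (nodes : List String) (edges : List (String × String)) : List String :=
  PySem.Set.ofList (nodes ++ edges.flatMap (fun e => [e.1, e.2]))

def pvSuccsOf (edges : List (String × String)) (x : String) : List String :=
  (edges.filter (fun e => e.1 == x)).map (fun e => e.2)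

def pvStepSet (edges : List (String × String)) (S : PySem.Set String) : PySem.Set String :=
  PySem.Set.update S (S.flatMap (pvSuccsOf edges))

def pvSatur (edges : List (String × String)) : Nat → PySem.Set String → PySem.Set String
  | 0, S => S
  | f + 1, S => pvSatur edges f (pvStepSet edges S)

def pvRoots (nodes : List String) (edges : List (String × String)) : List String :=
  (pvAllNodes nodes edges).filter (fun n => !(edges.any (fun e => e.2 == n)))

-- Pre_ excludes exactly the cyclic dependency graphs, on which Python's topological_sort
-- raises ValueError('dependency cycle detected'); the second conjunct (every node reachable
-- from a parentless node) is implied by acyclicity, so it excludes nothing further.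
def Pre_parallel_execution_groups (nodes : List String) (edges : List (String × String)) : Prop :=
  (∀ n ∈ pvAllNodes nodes edges,
      n ∉ pvSatur edges ((pvAllNodes nodes edges).length + 1) (PySem.Set.ofList (pvSuccsOf edges n)))
  ∧ (∀ n ∈ pvAllNodes nodes edges,
      n ∈ pvSatur edges ((pvAllNodes nodes edges).length + 1) (PySem.Set.ofList (pvRoots nodes edges)))

instance (nodes : List String) (edges : List (String × String)) : Decidable (Pre_parallel_execution_groups nodes edges) := by
  unfold Pre_parallel_execution_groups; infer_instance

def pvWitness_parallel_execution_groups : List String × (List (String × String)) :=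
  (["a", "b", "c"], [("a", "b"), ("a", "c"), ("b", "c")])

def Spec_parallel_execution_groups (nodes : List String) (edges : List (String × String)) (out : List (List String)) : Prop := out = parallel_execution_groups_alt nodes edges
instance (nodes : List String) (edges : List (String × String)) (out : List (List String)) : Decidable (Spec_parallel_execution_groups nodes edges out) := by unfold Spec_parallel_execution_groups; infer_instance

-- ===== CLAIM (what is proved, stated in full; the proofs are below) =====
def Claim_equal_parallel_execution_groups : Prop := ∀ (nodes : List String) (edges : List (String × String)), Dom_parallel_execution_groups nodes edges → Pre_parallel_execution_groups nodes edges → Spec_parallel_execution_groups nodes edges (parallel_execution_groups nodes edges)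

-- ===== LEMMAS AND PROOFS =====

-- ===== A-side pass (one whole queue generation) machinery =====

theorem pvPushAShift (children : PySem.Dict String (List String)) (cur : String)
    (s : PySem.Dict String Int) (acc : List String) :
    pvPushA children cur (s, acc) = ((pvPushA children cur (s, [])).1, acc ++ (pvPushA children cur (s, [])).2) := by
  exact pvFoldShift (fun (d : PySem.Dict String Int) c => d.contains c)
    (fun d c => d.insert c (d.getD cur 0 + 1)) (children.getD cur []) s acc

theorem pvPassAShift (children : PySem.Dict String (List String)) :
    ∀ (q : List String) (s : PySem.Dict String Int) (acc : List String),
      q.foldl (fun st cur => pvPushA children cur st) (s, acc)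
        = ((q.foldl (fun st cur => pvPushA children cur st) (s, [])).1,
           acc ++ (q.foldl (fun st cur => pvPushA children cur st) (s, [])).2) := by
  intro q
  induction q with
  | nil => intro s acc; simp
  | cons n q ih =>
      intro s acc
      simp only [List.foldl_cons]
      rw [pvPushAShift children n s acc]
      rw [ih (pvPushA children n (s, [])).1 (acc ++ (pvPushA children n (s, [])).2)]
      conv_rhs => rw [show pvPushA children n (s, [])
        = ((pvPushA children n (s, [])).1, (pvPushA children n (s, [])).2) from rfl]
      rw [ih (pvPushA children n (s, [])).1 ((pvPushA children n (s, [])).2)]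
      simp

-- state correspondence between A's level dict and B's seen set, along one node expansion
theorem pvCorrFold (cur : String) :
    ∀ (cs : List String) (lv : PySem.Dict String Int) (seen : PySem.Set String) (acc : List String),
      (∀ x, lv.contains x = PySem.Set.contains seen x) →
      (cs.foldl (fun st child => if st.1.contains child then st
          else (st.1.insert child (st.1.getD cur 0 + 1), st.2 ++ [child])) (lv, acc)).2
        = (cs.foldl (fun st child => if PySem.Set.contains st.1 child then st
          else (PySem.Set.add st.1 child, st.2 ++ [child])) (seen, acc)).2
      ∧ ∀ x,
        (cs.foldl (fun st child => if st.1.contains child then st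
          else (st.1.insert child (st.1.getD cur 0 + 1), st.2 ++ [child])) (lv, acc)).1.contains x
        = PySem.Set.contains
          (cs.foldl (fun st child => if PySem.Set.contains st.1 child then st
            else (PySem.Set.add st.1 child, st.2 ++ [child])) (seen, acc)).1 x := by
  intro cs
  induction cs with
  | nil => intro lv seen acc hC; exact ⟨rfl, hC⟩
  | cons c cs ih =>
      intro lv seen acc hC
      have hs := (hC c).symm
      rcases hcc : lv.contains c with _ | _
      · rw [hcc] at hs
        simp only [List.foldl_cons, hcc, hs, Bool.false_eq_true, if_false]
        exact ih _ _ _ (fun x => by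
          rw [PySem.Dict.contains_insert, pvSetContainsAdd, hC x])
      · rw [hcc] at hs
        simp only [List.foldl_cons, hcc, hs, if_true]
        exact ih _ _ _ hC

theorem pvCorrPass (children : PySem.Dict String (List String)) :
    ∀ (q : List String) (lv : PySem.Dict String Int) (seen : PySem.Set String) (acc : List String),
      (∀ x, lv.contains x = PySem.Set.contains seen x) →
      (q.foldl (fun st cur => pvPushA children cur st) (lv, acc)).2
        = (q.foldl (pvPushB children) (seen, acc)).2
      ∧ ∀ x, (q.foldl (fun st cur => pvPushA children cur st) (lv, acc)).1.contains x
          = PySem.Set.contains (q.foldl (pvPushB children) (seen, acc)).1 x := by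
  intro q
  induction q with
  | nil => intro lv seen acc hC; exact ⟨rfl, hC⟩
  | cons n q ih =>
      intro lv seen acc hC
      obtain ⟨e1, e2⟩ := pvCorrFold n (children.getD n []) lv seen acc hC
      simp only [List.foldl_cons]
      have hA : pvPushA children n (lv, acc)
          = ((pvPushA children n (lv, acc)).1, (pvPushA children n (lv, acc)).2) := rfl
      have hB : pvPushB children (seen, acc) n
          = ((pvPushB children (seen, acc) n).1, (pvPushB children (seen, acc) n).2) := rfl
      rw [hA, hB]
      rw [show (pvPushA children n (lv, acc)).2 = (pvPushB children (seen, acc) n).2 from e1]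
      exact ih _ _ _ e2

theorem pvItemsPush (children : PySem.Dict String (List String)) (cur : String) (k : Int) :
    ∀ (lv : PySem.Dict String Int),
      lv.get? cur = some k → lv.keys.Nodup →
      (pvPushA children cur (lv, [])).1.items
          = lv.items ++ (pvPushA children cur (lv, [])).2.map (fun c => (c, k + 1))
      ∧ (pvPushA children cur (lv, [])).1.keys.Nodup
      ∧ (∀ x, lv.contains x = true → (pvPushA children cur (lv, [])).1.get? x = lv.get? x) := by
  suffices h : ∀ (cs : List String) (lv : PySem.Dict String Int),
      lv.get? cur = some k → lv.keys.Nodup →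
      (cs.foldl (fun st child => if st.1.contains child then st
          else (st.1.insert child (st.1.getD cur 0 + 1), st.2 ++ [child])) (lv, [])).1.items
        = lv.items ++ (cs.foldl (fun st child => if st.1.contains child then st
          else (st.1.insert child (st.1.getD cur 0 + 1), st.2 ++ [child])) (lv, [])).2.map (fun c => (c, k + 1))
      ∧ (cs.foldl (fun st child => if st.1.contains child then st
          else (st.1.insert child (st.1.getD cur 0 + 1), st.2 ++ [child])) (lv, [])).1.keys.Nodup
      ∧ (∀ x, lv.contains x = true →
          (cs.foldl (fun st child => if st.1.contains child then st
            else (st.1.insert child (st.1.getD cur 0 + 1), st.2 ++ [child])) (lv, [])).1.get? x = lv.get? x) by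
    intro lv h1 h2; exact h (children.getD cur []) lv h1 h2
  intro cs
  induction cs with
  | nil => intro lv h1 h2; exact ⟨by simp, h2, fun x _ => rfl⟩
  | cons c cs ih =>
      intro lv h1 h2
      rcases hcc : lv.contains c with _ | _
      · -- fresh child: insert it with value k+1 and recurse from the bigger dict
        have hcur : lv.contains cur = true := by
          rw [PySem.Dict.contains_eq_isSome_get?, h1]; rfl
        have hne : cur ≠ c := fun he => by rw [he, hcc] at hcur; cases hcur
        have hgd : lv.getD cur 0 = k := PySem.Dict.getD_of_get?_eq_some lv 0 h1
        have h1' : (lv.insert c (lv.getD cur 0 + 1)).get? cur = some k := by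
          rw [PySem.Dict.get?_insert_of_ne _ _ hne, h1]
        have h2' : (lv.insert c (lv.getD cur 0 + 1)).keys.Nodup :=
          PySem.Dict.nodup_keys_insert _ _ _ h2
        obtain ⟨i1, i2, i3⟩ := ih (lv.insert c (lv.getD cur 0 + 1)) h1' h2'
        have hshift := pvFoldShift (fun (d : PySem.Dict String Int) x => d.contains x)
          (fun d x => d.insert x (d.getD cur 0 + 1)) cs (lv.insert c (lv.getD cur 0 + 1)) [c]
        have hitems : (lv.insert c (lv.getD cur 0 + 1)).items
            = lv.items ++ [(c, k + 1)] := by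
          rw [PySem.Dict.items_insert_of_not_contains _ _ hcc, hgd]
        simp only [List.foldl_cons, hcc, Bool.false_eq_true, if_false, List.nil_append]
        rw [hshift]
        refine ⟨?_, i2, ?_⟩
        · rw [i1, hitems]
          simp
        · intro x hx
          have hxc : x ≠ c := fun he => by rw [he, hcc] at hx; cases hx
          have hx' : (lv.insert c (lv.getD cur 0 + 1)).contains x = true := by
            rw [PySem.Dict.contains_insert, hx, Bool.or_true]
          rw [i3 x hx']
          exact PySem.Dict.get?_insert_of_ne _ _ hxc
      · simp only [List.foldl_cons, hcc, if_true]
        exact ih lv h1 h2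

theorem pvItemsPass (children : PySem.Dict String (List String)) :
    ∀ (q : List String) (k : Int) (lv : PySem.Dict String Int),
      (∀ cur ∈ q, lv.get? cur = some k) → lv.keys.Nodup →
      (q.foldl (fun st cur => pvPushA children cur st) (lv, [])).1.items
          = lv.items ++ (q.foldl (fun st cur => pvPushA children cur st) (lv, [])).2.map (fun c => (c, k + 1))
      ∧ (q.foldl (fun st cur => pvPushA children cur st) (lv, [])).1.keys.Nodup
      ∧ (∀ x, lv.contains x = true →
          (q.foldl (fun st cur => pvPushA children cur st) (lv, [])).1.get? x = lv.get? x) := by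
  intro q
  induction q with
  | nil => intro k lv _ h2; exact ⟨by simp, h2, fun x _ => rfl⟩
  | cons n q ih =>
      intro k lv hq h2
      obtain ⟨p1, p2, p3⟩ := pvItemsPush children n k lv (hq n List.mem_cons_self) h2
      obtain ⟨_, _, _, mono, _, _, _⟩ := pvPushACore children n lv
      have hq' : ∀ cur ∈ q, (pvPushA children n (lv, [])).1.get? cur = some k := by
        intro cur hc
        have hg := hq cur (List.mem_cons_of_mem _ hc)
        have : lv.contains cur = true := by
          rw [PySem.Dict.contains_eq_isSome_get?, hg]; rfl
        rw [p3 cur this, hg]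
      obtain ⟨i1, i2, i3⟩ := ih k (pvPushA children n (lv, [])).1 hq' p2
      simp only [List.foldl_cons]
      have : pvPushA children n (lv, [])
          = ((pvPushA children n (lv, [])).1, (pvPushA children n (lv, [])).2) := rfl
      rw [this, pvPassAShift children q (pvPushA children n (lv, [])).1 (pvPushA children n (lv, [])).2]
      refine ⟨?_, i2, ?_⟩
      · rw [i1, p1]
        simp
      · intro x hx
        rw [i3 x (mono x hx)]
        exact p3 x hx

theorem pvBfsA_nil (children : PySem.Dict String (List String)) (lv : PySem.Dict String Int) :
    pvBfsA children [] lv = lv := by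
  rw [pvBfsA]

theorem pvBfsA_cons (children : PySem.Dict String (List String)) (cur : String)
    (rest : List String) (lv : PySem.Dict String Int) :
    pvBfsA children (cur :: rest) lv
      = pvBfsA children (rest ++ (pvPushA children cur (lv, [])).2) (pvPushA children cur (lv, [])).1 := by
  rw [pvBfsA]

theorem pvBfsB_cons (children : PySem.Dict String (List String)) (c : String)
    (rest : List String) (seen : PySem.Set String) :
    pvBfsB children (c :: rest) seen
      = PySem.Set.ofList (c :: rest)
        :: pvBfsB children ((c :: rest).foldl (pvPushB children) (seen, [])).2
             ((c :: rest).foldl (pvPushB children) (seen, [])).1 := by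
  rw [pvBfsB]

theorem pvBfsAFifo (children : PySem.Dict String (List String)) :
    ∀ (q extra : List String) (lv : PySem.Dict String Int),
      pvBfsA children (q ++ extra) lv
        = pvBfsA children (extra ++ (q.foldl (fun st cur => pvPushA children cur st) (lv, [])).2)
            ((q.foldl (fun st cur => pvPushA children cur st) (lv, [])).1) := by
  intro q
  induction q with
  | nil => intro extra lv; simp
  | cons a q ih =>
      intro extra lv
      have hstep : (a :: q) ++ extra = a :: (q ++ extra) := rfl
      rw [hstep, pvBfsA_cons, List.append_assoc]
      rw [ih (extra ++ (pvPushA children a (lv, [])).2) (pvPushA children a (lv, [])).1]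
      simp only [List.foldl_cons]
      conv_rhs => rw [show pvPushA children a (lv, [])
        = ((pvPushA children a (lv, [])).1, (pvPushA children a (lv, [])).2) from rfl]
      rw [pvPassAShift children q (pvPushA children a (lv, [])).1 (pvPushA children a (lv, [])).2]
      rw [List.append_assoc]

-- tag group i (0-based from j) with level j+i, flattened
def pvTag : Int → List (List String) → List (String × Int)
  | _, [] => []
  | j, g :: gs => g.map (fun c => (c, j)) ++ pvTag (j + 1) gs

-- the heart of the equivalence: running A's FIFO BFS from a frontier whose nodes all sit at
-- level k produces exactly the level dict whose new items are B's later frontiers tagged k+1, k+2, …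
theorem pvBfsB_nil (children : PySem.Dict String (List String)) (seen : PySem.Set String) :
    pvBfsB children [] seen = [] := by
  rw [pvBfsB]

-- the heart of the equivalence: running A's FIFO BFS from a frontier whose nodes all sit at
-- level k produces exactly the level dict whose new items are B's later frontiers tagged k+1, k+2, …
theorem pvMaster (children : PySem.Dict String (List String)) :
    ∀ (N : Nat) (q : List String) (lv : PySem.Dict String Int) (seen : PySem.Set String) (k : Int),
      ((children.values.flatten).filter (fun c => !(PySem.Set.contains seen c))).length ≤ N →
      (∀ x, lv.contains x = PySem.Set.contains seen x) →
      lv.keys.Nodup →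
      (∀ x ∈ q, lv.get? x = some k) →
      (pvBfsA children q lv).items
        = lv.items ++ pvTag (k + 1)
            (pvBfsB children (q.foldl (pvPushB children) (seen, [])).2
              (q.foldl (pvPushB children) (seen, [])).1) := by
  intro N
  induction N using Nat.strong_induction_on with
  | _ N ihN =>
  intro q lv seen k hN hC hnd hq
  obtain ⟨e1, e2⟩ := pvCorrPass children q lv seen [] hC
  obtain ⟨i1, i2, i3⟩ := pvItemsPass children q k lv hq hnd
  have hterm := pvPassB_term children q seen
  have hfifo : pvBfsA children q lv
      = pvBfsA children (q.foldl (pvPushB children) (seen, [])).2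
          (q.foldl (fun st cur => pvPushA children cur st) (lv, [])).1 := by
    conv_lhs => rw [show q = q ++ [] from (List.append_nil q).symm]
    rw [pvBfsAFifo children q [] lv, e1]
    rfl
  rcases hn : (q.foldl (pvPushB children) (seen, [])).2 with _ | ⟨b, bs⟩
  · -- no new nodes: BFS is finished and B produces no further groups
    have hlv : (q.foldl (fun st cur => pvPushA children cur st) (lv, [])).1 = lv := by
      apply PySem.Dict.ext
      rw [i1, e1, hn]
      simp
    rw [hfifo, hn, hlv, pvBfsA_nil, pvBfsB_nil]
    simp [pvTag]
  · -- at least one new node: the filter measure strictly drops, recurse one level deeper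
    have hne : (q.foldl (pvPushB children) (seen, [])).2 ≠ [] := by rw [hn]; simp
    have hlt : ((children.values.flatten).filter
        (fun c => !(PySem.Set.contains (q.foldl (pvPushB children) (seen, [])).1 c))).length < N := by
      rw [hn] at hterm
      simp only [List.length_cons] at hterm
      omega
    obtain ⟨news, b1, b2, b3, b4, b5⟩ := pvPassBCore children q seen
    have hnodup : (q.foldl (pvPushB children) (seen, [])).2.Nodup := by rw [b1]; exact b2
    have hq' : ∀ x ∈ (q.foldl (pvPushB children) (seen, [])).2,
        (q.foldl (fun st cur => pvPushA children cur st) (lv, [])).1.get? x = some (k + 1) := by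
      intro x hx
      rw [← e1] at hx
      apply PySem.Dict.get?_of_mem_items _ _ i2
      rw [i1]
      exact List.mem_append_right _ (List.mem_map_of_mem hx)
    have ih := ihN _ hlt (q.foldl (pvPushB children) (seen, [])).2
      (q.foldl (fun st cur => pvPushA children cur st) (lv, [])).1
      (q.foldl (pvPushB children) (seen, [])).1 (k + 1) (le_refl _) e2 i2 hq'
    rw [hfifo, ih, i1, e1]
    rw [show (q.foldl (pvPushB children) (seen, [])).2
        = b :: bs from hn]
    rw [pvBfsB_cons]
    rw [show (b :: bs) = (q.foldl (pvPushB children) (seen, [])).2 from hn.symm]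
    rw [PySem.Set.ofList_eq_self_of_nodup _ hnodup]
    simp [pvTag, List.append_assoc]

-- conjunct 7 helper: where new containments can come from
theorem pvPushARev (children : PySem.Dict String (List String)) (cur : String)
    (lv : PySem.Dict String Int) :
    ∀ x, (pvPushA children cur (lv, [])).1.contains x = true →
      lv.contains x = true ∨ x ∈ (pvPushA children cur (lv, [])).2 := by
  suffices h : ∀ (cs : List String) (lv : PySem.Dict String Int) (acc : List String),
      ∀ x, (cs.foldl (fun st child => if st.1.contains child then st
          else (st.1.insert child (st.1.getD cur 0 + 1), st.2 ++ [child])) (lv, acc)).1.contains x = true →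
        lv.contains x = true
        ∨ x ∈ (cs.foldl (fun st child => if st.1.contains child then st
            else (st.1.insert child (st.1.getD cur 0 + 1), st.2 ++ [child])) (lv, acc)).2 by
    intro x hx; exact h (children.getD cur []) lv [] x hx
  intro cs
  induction cs with
  | nil => intro lv acc x hx; exact Or.inl hx
  | cons c cs ih =>
      intro lv acc x hx
      rcases hcc : lv.contains c with _ | _
      · simp only [List.foldl_cons, hcc, Bool.false_eq_true, if_false] at hx ⊢
        rcases ih _ _ x hx with h | h
        · rw [PySem.Dict.contains_insert] at h
          rcases Bool.or_eq_true _ _ |>.mp h with h | h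
          · have hxc : x = c := by simpa using h
            right
            obtain ⟨news, n1, _, _, _, _, _⟩ :=
              pvFoldCore (fun (d : PySem.Dict String Int) y => d.contains y)
                (fun d y => d.insert y (d.getD cur 0 + 1))
                (fun s y z => PySem.Dict.contains_insert s y z _) cs
                (lv.insert c (lv.getD cur 0 + 1)) (acc ++ [c])
            rw [n1, hxc]
            exact List.mem_append_left _ (List.mem_append_right _ List.mem_cons_self)
          · exact Or.inl h
        · exact Or.inr h
      · simp only [List.foldl_cons, hcc, if_true] at hx ⊢
        exact ih _ _ x hx

theorem pvBfsA_mono (children : PySem.Dict String (List String)) :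
    ∀ (q : List String) (lv : PySem.Dict String Int) (x : String),
      lv.contains x = true → (pvBfsA children q lv).contains x = true := by
  intro q lv
  induction q, lv using pvBfsA.induct children with
  | case1 lv => intro x hx; rwa [pvBfsA_nil]
  | case2 cur rest lv st ih =>
      intro x hx
      rw [pvBfsA_cons]
      obtain ⟨_, _, _, mono, _, _, _⟩ := pvPushACore children cur lv
      exact ih x (mono x hx)

-- after the BFS finishes, the visited set is closed under the children relation
theorem pvBfsA_closed (children : PySem.Dict String (List String)) :
    ∀ (q : List String) (lv : PySem.Dict String Int),
      (∀ x ∈ q, lv.contains x = true) →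
      (∀ x, lv.contains x = true → x ∈ q ∨ ∀ c ∈ children.getD x [], lv.contains c = true) →
      ∀ x, (pvBfsA children q lv).contains x = true →
        ∀ c ∈ children.getD x [], (pvBfsA children q lv).contains c = true := by
  intro q lv
  induction q, lv using pvBfsA.induct children with
  | case1 lv =>
      intro _ hH x hx c hc
      rw [pvBfsA_nil] at *
      rcases hH x hx with h | h
      · cases h
      · exact h c hc
  | case2 cur rest lv st ih =>
      intro hq hH x hx c hc
      obtain ⟨news, n1, n2, mono, nfresh, n5, nall⟩ := pvPushACore children cur lv
      rw [pvBfsA_cons] at hx ⊢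
      refine ih ?_ ?_ x hx c hc
      · intro y hy
        rcases List.mem_append.1 hy with hy | hy
        · exact mono y (hq y (List.mem_cons_of_mem _ hy))
        · exact ((nfresh y (n1 ▸ hy)).2.2)
      · intro y hy
        rcases pvPushARev children cur lv y hy with hold | hnew
        · rcases hH y hold with hmem | hcl
          · rcases List.mem_cons.1 hmem with rfl | hmem
            · exact Or.inr (fun d hd => nall d hd)
            · exact Or.inl (List.mem_append_left _ hmem)
          · exact Or.inr (fun d hd => mono d (hcl d hd))
        · exact Or.inl (List.mem_append_right _ hnew)

-- elements appended inside one Kahn step come from the sorted child list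
theorem pvKahnStepSub (cs : List String) :
    ∀ (ind : PySem.Dict String Int) (acc : List String),
      ∀ x ∈ (cs.foldl (fun (st : PySem.Dict String Int × List String) nb =>
          let ind' := st.1.insert nb (st.1.getD nb 0 - 1)
          if ind'.getD nb 0 == 0 then (ind', st.2 ++ [nb]) else (ind', st.2)) (ind, acc)).2,
        x ∈ acc ∨ x ∈ cs := by
  induction cs with
  | nil => intro ind acc x hx; exact Or.inl hx
  | cons c cs ih =>
      intro ind acc x hx
      simp only [List.foldl_cons] at hx
      by_cases hz : ((ind.insert c (ind.getD c 0 - 1)).getD c 0 == 0) = true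
      · simp only [hz, if_true] at hx
        rcases ih _ _ x hx with h | h
        · rcases List.mem_append.1 h with h | h
          · exact Or.inl h
          · have hxc : x = c := List.mem_singleton.1 h
            exact Or.inr (by simp [hxc])
        · exact Or.inr (List.mem_cons_of_mem _ h)
      · simp only [hz] at hx
        simp only [Bool.false_eq_true, if_false] at hx
        rcases ih _ _ x hx with h | h
        · exact Or.inl h
        · exact Or.inr (List.mem_cons_of_mem _ h)

-- everything in the queue (or already emitted) ends up in Kahn's output
theorem pvKahnMem (graph : PySem.Dict String (List String)) :
    ∀ (fuel : Nat) (q : List String) (ind : PySem.Dict String Int) (acc : List String) res,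
      pvKahnLoop graph fuel q ind acc = some res →
      ∀ x, (x ∈ acc ∨ x ∈ q) → x ∈ res.1 := by
  intro fuel
  induction fuel with
  | zero =>
      intro q ind acc res h x hx
      rcases q with _ | ⟨n, rest⟩
      · simp only [pvKahnLoop] at h
        cases h
        rcases hx with h | h
        · exact h
        · cases h
      · simp only [pvKahnLoop] at h
        simp at h
  | succ fuel ih =>
      intro q ind acc res h x hx
      rcases q with _ | ⟨n, rest⟩
      · simp only [pvKahnLoop] at h
        cases h
        rcases hx with h | h
        · exact h
        · cases h
      · simp only [pvKahnLoop] at h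
        refine ih _ _ _ _ h x ?_
        rcases hx with h' | h'
        · exact Or.inl (List.mem_append_left _ h')
        · rcases List.mem_cons.1 h' with rfl | h'
          · exact Or.inl (List.mem_append_right _ List.mem_cons_self)
          · exact Or.inr (List.mem_append_left _ h')

-- everything in Kahn's output was in the queue, emitted, or is some node's child
theorem pvKahnSub (graph : PySem.Dict String (List String)) :
    ∀ (fuel : Nat) (q : List String) (ind : PySem.Dict String Int) (acc : List String) res,
      pvKahnLoop graph fuel q ind acc = some res →
      ∀ x ∈ res.1, x ∈ acc ∨ x ∈ q ∨ x ∈ graph.values.flatten := by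
  intro fuel
  induction fuel with
  | zero =>
      intro q ind acc res h x hx
      rcases q with _ | ⟨n, rest⟩
      · simp only [pvKahnLoop] at h
        cases h
        exact Or.inl hx
      · simp only [pvKahnLoop] at h
        simp at h
  | succ fuel ih =>
      intro q ind acc res h x hx
      rcases q with _ | ⟨n, rest⟩
      · simp only [pvKahnLoop] at h
        cases h
        exact Or.inl hx
      · simp only [pvKahnLoop] at h
        rcases ih _ _ _ _ h x hx with h' | h' | h'
        · rcases List.mem_append.1 h' with h' | h'
          · exact Or.inl h'
          · have hxn : x = n := List.mem_singleton.1 h'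
            exact Or.inr (Or.inl (by simp [hxn]))
        · rcases List.mem_append.1 h' with h' | h'
          · exact Or.inr (Or.inl (List.mem_cons_of_mem _ h'))
          · rcases pvKahnStepSub _ _ _ x h' with h'' | h''
            · cases h''
            · refine Or.inr (Or.inr ?_)
              have hmem : x ∈ graph.getD n [] :=
                (PySem.List.sorted_perm (graph.getD n []) (fun y => y) false).mem_iff.1 h''
              exact pvGetDValuesSub graph n x hmem
        · exact Or.inr (Or.inr h')

-- the iterated step closure stays inside any step-closed superset
theorem pvSaturMin (edges : List (String × String)) (p : String → Prop) :
    ∀ (f : Nat) (S : PySem.Set String),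
      (∀ x ∈ S, p x) →
      (∀ x, p x → ∀ c ∈ pvSuccsOf edges x, p c) →
      ∀ x ∈ pvSatur edges f S, p x := by
  intro f
  induction f with
  | zero => intro S hS _ x hx; exact hS x hx
  | succ f ih =>
      intro S hS hcl x hx
      simp only [pvSatur] at hx
      refine ih _ ?_ hcl x hx
      intro y hy
      rcases (PySem.Set.mem_update _ _ y).1 hy with h | h
      · exact hS y h
      · obtain ⟨z, hz, hyz⟩ := List.mem_flatMap.1 h
        exact hcl z (hS z hz) y hyz

-- splitting the paired build folds into their components
theorem pvChildrenSeen_eq (edges : List (String × String)) :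
    pvChildrenSeen edges
      = (edges.foldl (fun d e => d.modify e.1 [] (fun l => l ++ [e.2])) PySem.Dict.empty,
         edges.foldl (fun s e => PySem.Set.add s e.2) PySem.Set.empty) := by
  rw [pvChildrenSeen]
  exact PySem.List.foldl_prod_mk
    (fun d (e : String × String) => d.modify e.1 [] (fun l => l ++ [e.2]))
    (fun s (e : String × String) => PySem.Set.add s e.2) edges PySem.Dict.empty PySem.Set.empty

theorem pvGraphInd_eq (nodes : List String) (edges : List (String × String)) :
    pvGraphInd nodes edges
      = (edges.foldl (fun d e => d.modify e.1 [] (fun l => l ++ [e.2])) PySem.Dict.empty,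
         edges.foldl (fun d e => (d.insert e.2 (d.getD e.2 0 + 1)).setdefault e.1 0)
           (nodes.foldl (fun d n => d.insert n 0) PySem.Dict.empty)) := by
  rw [pvGraphInd]
  exact PySem.List.foldl_prod_mk
    (fun d (e : String × String) => d.modify e.1 [] (fun l => l ++ [e.2]))
    (fun (d : PySem.Dict String Int) (e : String × String) => (d.insert e.2 (d.getD e.2 0 + 1)).setdefault e.1 0)
    edges PySem.Dict.empty _

-- the children map sends each node to its successor list, in edge order
theorem pvChildren_getD (edges : List (String × String)) (x : String) :
    (edges.foldl (fun d e => d.modify e.1 [] (fun l => l ++ [e.2])) PySem.Dict.empty).getD x []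
      = pvSuccsOf edges x := by
  have := PySem.Dict.getD_foldl_modify_append edges PySem.Dict.empty x
  rw [this]
  simp [pvSuccsOf]

theorem pvChildren_keys_nodup (edges : List (String × String)) :
    (edges.foldl (fun d e => d.modify e.1 [] (fun l => l ++ [e.2])) PySem.Dict.empty).keys.Nodup := by
  rw [PySem.Dict.keys_foldl_modify_key edges (fun e => e.1) [] (fun _ e l => l ++ [e.2]) PySem.Dict.empty]
  rw [PySem.Dict.keys_empty, PySem.Set.update_nil_left]
  exact PySem.Set.nodup_ofList _

-- everything stored in the children map is some edge's target
theorem pvChildren_values (edges : List (String × String)) (x : String) :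
    x ∈ (edges.foldl (fun d e => d.modify e.1 [] (fun l => l ++ [e.2])) PySem.Dict.empty).values.flatten →
    ∃ e ∈ edges, x = e.2 := by
  intro hx
  obtain ⟨v, hv, hxv⟩ := List.mem_flatten.1 hx
  simp only [PySem.Dict.values, List.mem_map] at hv
  obtain ⟨⟨k, w⟩, hkw, hw⟩ := hv
  have hget := PySem.Dict.get?_of_mem_items _ hkw (pvChildren_keys_nodup edges)
  have : (edges.foldl (fun d e => d.modify e.1 [] (fun l => l ++ [e.2])) PySem.Dict.empty).getD k [] = w :=
    PySem.Dict.getD_of_get?_eq_some _ [] hget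
  rw [pvChildren_getD] at this
  rw [← hw, ← this] at hxv
  simp only [pvSuccsOf, List.mem_map] at hxv
  obtain ⟨e, he, hex⟩ := hxv
  exact ⟨e, List.mem_filter.1 he |>.1, hex.symm⟩

-- has_parent is exactly the target set
theorem pvHasParent_mem (edges : List (String × String)) (x : String) :
    x ∈ (edges.foldl (fun s e => PySem.Set.add s e.2) PySem.Set.empty) ↔ ∃ e ∈ edges, x = e.2 := by
  have h1 : (edges.foldl (fun s e => PySem.Set.add s e.2) PySem.Set.empty)
      = PySem.Set.update PySem.Set.empty (edges.map (fun e => e.2)) := by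
    rw [PySem.Set.update_map_eq_foldl_add]
  rw [h1]
  rw [show (PySem.Set.empty : PySem.Set String) = ([] : List String) from rfl]
  rw [PySem.Set.update_nil_left]
  rw [PySem.Set.mem_ofList]
  simp [List.mem_map, eq_comm]

-- the initial indegree dict: every key maps to 0, keys = nodes
theorem pvInit_contains (nodes : List String) (x : String) :
    (nodes.foldl (fun d n => d.insert n 0) (PySem.Dict.empty : PySem.Dict String Int)).contains x = true
      ↔ x ∈ nodes := by
  rw [PySem.Dict.contains_iff_mem_keys]
  rw [PySem.Dict.keys_foldl_insert nodes (fun _ _ => (0 : Int)) PySem.Dict.empty]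
  rw [PySem.Dict.keys_empty, PySem.Set.update_nil_left, PySem.Set.mem_ofList]

theorem pvInit_getD (nodes : List String) (x : String) :
    (nodes.foldl (fun d n => d.insert n 0) (PySem.Dict.empty : PySem.Dict String Int)).getD x 0 = 0 := by
  induction nodes using List.reverseRecOn with
  | nil => simp [PySem.Dict.getD_empty]
  | append_singleton ns n ih =>
      rw [List.foldl_append, List.foldl_cons, List.foldl_nil]
      by_cases hx : x = n
      · rw [hx, PySem.Dict.getD_insert_self]
      · exact (PySem.Dict.getD_insert_of_ne _ 0 0 hx).trans ih

-- membership in the final indegree dict's keys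
theorem pvInd_contains :
    ∀ (edges : List (String × String)) (d : PySem.Dict String Int) (x : String),
      (edges.foldl (fun d e => (d.insert e.2 (d.getD e.2 0 + 1)).setdefault e.1 0) d).contains x = true
        ↔ d.contains x = true ∨ ∃ e ∈ edges, x = e.1 ∨ x = e.2 := by
  intro edges
  induction edges with
  | nil => intro d x; simp
  | cons e es ih =>
      intro d x
      rw [List.foldl_cons, ih]
      rw [PySem.Dict.contains_setdefault]
      rw [PySem.Dict.contains_insert]
      constructor
      · rintro (h | h)
        · rcases Bool.or_eq_true _ _ |>.mp h with h' | h'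
          · exact Or.inr ⟨e, List.mem_cons_self, Or.inl (by simpa using h')⟩
          · rcases Bool.or_eq_true _ _ |>.mp h' with h'' | h''
            · exact Or.inr ⟨e, List.mem_cons_self, Or.inr (by simpa using h'')⟩
            · exact Or.inl h''
        · obtain ⟨e', he', hx⟩ := h
          exact Or.inr ⟨e', List.mem_cons_of_mem _ he', hx⟩
      · rintro (h | ⟨e', he', hx⟩)
        · exact Or.inl (by rw [show (d.contains x) = true from h]; simp)
        · rcases List.mem_cons.1 he' with rfl | he'
          · rcases hx with rfl | rfl
            · exact Or.inl (by simp)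
            · exact Or.inl (by simp)
          · exact Or.inr ⟨e', he', hx⟩

-- a node that is never an edge target keeps indegree 0
theorem pvInd_getD_zero (x : String) :
    ∀ (edges : List (String × String)) (d : PySem.Dict String Int),
      (∀ e ∈ edges, x ≠ e.2) →
      (edges.foldl (fun d e => (d.insert e.2 (d.getD e.2 0 + 1)).setdefault e.1 0) d).getD x 0
        = d.getD x 0 := by
  intro edges
  induction edges with
  | nil => intro d _; rfl
  | cons e es ih =>
      intro d hne
      rw [List.foldl_cons, ih _ (fun e' he' => hne e' (List.mem_cons_of_mem _ he'))]
      have hx2 : x ≠ e.2 := hne e List.mem_cons_self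
      by_cases hx1 : x = e.1
      · rw [hx1, PySem.Dict.getD_setdefault_self]
        rw [← hx1]
        rw [PySem.Dict.getD_eq_get?_getD, PySem.Dict.get?_insert_of_ne _ _ hx2, ← PySem.Dict.getD_eq_get?_getD]
      · rw [PySem.Dict.getD_eq_get?_getD, PySem.Dict.get?_setdefault_of_ne _ _ hx1,
          PySem.Dict.get?_insert_of_ne _ _ hx2, ← PySem.Dict.getD_eq_get?_getD]

-- the root-collecting loop of A: a level-0 dict over the parentless nodes, plus the root queue
theorem pvLq_eq (hp : PySem.Set String) (ordered : List String) :
    ordered.foldl (fun (st : PySem.Dict String Int × List String) n =>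
        if PySem.Set.contains hp n then st else (st.1.insert n 0, st.2 ++ [n]))
      (PySem.Dict.empty, [])
    = ((ordered.filter (fun n => !(PySem.Set.contains hp n))).foldl
         (fun d n => d.insert n 0) PySem.Dict.empty,
       ordered.filter (fun n => !(PySem.Set.contains hp n))) := by
  have hfun : (fun (st : PySem.Dict String Int × List String) n =>
      if PySem.Set.contains hp n then st else (st.1.insert n 0, st.2 ++ [n]))
    = (fun st n =>
      (if (!(PySem.Set.contains hp n)) = true then st.1.insert n 0 else st.1,
       if (!(PySem.Set.contains hp n)) = true then st.2 ++ [n] else st.2)) := by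
    funext st n
    by_cases h : PySem.Set.contains hp n = true
    · have h2 : (!PySem.Set.contains hp n) = false := by rw [h]; rfl
      rw [if_pos h]
      simp only [h2, Bool.false_eq_true, if_false]
    · have h1 : PySem.Set.contains hp n = false := by
        rcases hc : PySem.Set.contains hp n with _ | _
        · rfl
        · exact absurd hc h
      have h2 : (!PySem.Set.contains hp n) = true := by rw [h1]; rfl
      rw [h1]
      simp only [Bool.not_false, Bool.false_eq_true, if_false, if_true]
  rw [hfun]
  rw [PySem.List.foldl_prod_mk
    (f := fun (d : PySem.Dict String Int) n => if (!(PySem.Set.contains hp n)) = true then d.insert n 0 else d)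
    (g := fun (acc : List String) n => if (!(PySem.Set.contains hp n)) = true then acc ++ [n] else acc)]
  rw [PySem.List.foldl_if_eq_foldl_filter (fun n => !(PySem.Set.contains hp n))
    (fun (d : PySem.Dict String Int) n => d.insert n 0) ordered PySem.Dict.empty]
  rw [PySem.List.foldl_append_if_eq_filter (fun n => !(PySem.Set.contains hp n)) ordered []]
  rfl

-- inserting value 0 for each list element, starting from a 0-valued dict
theorem pvInsertZeroItems :
    ∀ (l : List String) (d : PySem.Dict String Int) (s : PySem.Set String),
      d.items = s.map (fun n => (n, (0 : Int))) →
      (l.foldl (fun d n => d.insert n 0) d).items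
        = (PySem.Set.update s l).map (fun n => (n, (0 : Int))) := by
  intro l
  induction l with
  | nil => intro d s h; exact h
  | cons n l ih =>
      intro d s h
      have hkeys : d.keys = s := by
        rw [PySem.Dict.keys, h, List.map_map]
        rw [show ((Prod.fst ∘ fun n : String => (n, (0 : Int)))) = id from funext fun x => rfl]
        exact List.map_id s
      rw [List.foldl_cons, PySem.Set.update_cons]
      by_cases hmem : n ∈ s
      · have hc : d.contains n = true := by
          rw [PySem.Dict.contains_iff_mem_keys, hkeys]; exact hmem
        refine ih _ _ ?_
        rw [PySem.Dict.items_insert_of_contains _ _ hc, h, PySem.Set.add_of_mem hmem]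
        rw [List.map_map]
        apply List.map_congr_left
        intro x hx
        by_cases hxn : x = n <;> simp [hxn]
      · have hc : d.contains n = false := by
          rcases hcc : d.contains n with _ | _
          · rfl
          · exact absurd (hkeys ▸ (PySem.Dict.contains_iff_mem_keys d n).1 hcc) hmem
        refine ih _ _ ?_
        rw [PySem.Dict.items_insert_of_not_contains _ _ hc, h, PySem.Set.add_of_not_mem hmem]
        simp

-- if every listed node is already in the dict, the catch-all loop does nothing
theorem pvLeftoverId :
    ∀ (l : List String) (lv : PySem.Dict String Int),
      (∀ n ∈ l, lv.contains n = true) →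
      l.foldl (fun lv n => if lv.contains n then lv else lv.insert n 0) lv = lv := by
  intro l
  induction l with
  | nil => intro lv _; rfl
  | cons n l ih =>
      intro lv h
      rw [List.foldl_cons, if_pos (h n List.mem_cons_self)]
      exact ih lv (fun m hm => h m (List.mem_cons_of_mem _ hm))

-- ===== bucketing: rebuilding A's groups dict from the tagged level items =====
def pvTagG : Int → List (List String) → List (Int × PySem.Set String)
  | _, [] => []
  | j, g :: gs => (j, PySem.Set.ofList g) :: pvTagG (j + 1) gs

def pvKeysFrom : Int → Nat → List Int
  | _, 0 => []
  | j, n + 1 => j :: pvKeysFrom (j + 1) n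

theorem pvGroupSeg :
    ∀ (g : List String) (d : PySem.Dict Int (PySem.Set String)) (j : Int), g ≠ [] →
      g.foldl (fun d x => d.insert j (PySem.Set.add (d.getD j PySem.Set.empty) x)) d
        = d.insert j (PySem.Set.update (d.getD j PySem.Set.empty) g) := by
  intro g
  induction g with
  | nil => intro d j h; exact absurd rfl h
  | cons x g ih =>
      intro d j _
      rw [List.foldl_cons]
      rcases g with _ | ⟨y, g'⟩
      · rfl
      · rw [ih _ j (by simp)]
        rw [PySem.Dict.getD_insert_self, PySem.Dict.insert_insert_self]
        simp only [PySem.Set.update_cons]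

theorem pvBucket :
    ∀ (G : List (List String)) (j : Int) (d : PySem.Dict Int (PySem.Set String)),
      (∀ g ∈ G, g ≠ []) →
      (∀ i : Int, j ≤ i → d.contains i = false) →
      ((pvTag j G).foldl (fun (g : PySem.Dict Int (PySem.Set String)) p =>
          g.insert p.2 (PySem.Set.add (g.getD p.2 PySem.Set.empty) p.1)) d).items
        = d.items ++ pvTagG j G := by
  intro G
  induction G with
  | nil => intro j d _ _; simp [pvTag, pvTagG]
  | cons g gs ih =>
      intro j d hne hb
      have hcj : d.contains j = false := hb j (le_refl j)
      have hseg : (g.map (fun c => (c, j))).foldl (fun (gd : PySem.Dict Int (PySem.Set String)) p =>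
          gd.insert p.2 (PySem.Set.add (gd.getD p.2 PySem.Set.empty) p.1)) d
          = d.insert j (PySem.Set.ofList g) := by
        rw [List.foldl_map]
        rw [pvGroupSeg g d j (hne g List.mem_cons_self)]
        rw [PySem.Dict.getD_of_not_contains _ _ hcj]
        rw [show (PySem.Set.empty : PySem.Set String) = ([] : List String) from rfl]
        rw [PySem.Set.update_nil_left]
      have hstep : pvTag j (g :: gs) = g.map (fun c => (c, j)) ++ pvTag (j + 1) gs := rfl
      rw [hstep, List.foldl_append, hseg]
      rw [ih (j + 1) _ (fun g' hg' => hne g' (List.mem_cons_of_mem _ hg')) ?_]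
      · rw [PySem.Dict.items_insert_of_not_contains _ _ hcj]
        simp [pvTagG]
      · intro i hi
        rw [PySem.Dict.contains_insert]
        have h1 : (i == j) = false := by
          simp only [beq_eq_false_iff_ne, ne_eq]
          omega
        rw [h1, hb i (by omega)]
        rfl

theorem pvTagG_keys : ∀ (G : List (List String)) (j : Int),
    (pvTagG j G).map (fun p => p.1) = pvKeysFrom j G.length := by
  intro G
  induction G with
  | nil => intro j; rfl
  | cons g gs ih => intro j; simp [pvTagG, pvKeysFrom, ih]

theorem pvKeysFrom_bounds : ∀ (n : Nat) (j x : Int), x ∈ pvKeysFrom j n → j ≤ x ∧ x < j + n := by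
  intro n
  induction n with
  | zero => intro j x hx; cases hx
  | succ n ih =>
      intro j x hx
      rcases List.mem_cons.1 hx with rfl | hx
      · constructor <;> omega
      · have := ih (j + 1) x hx
        push_cast at this ⊢
        omega

theorem pvKeysFrom_nodup : ∀ (n : Nat) (j : Int), (pvKeysFrom j n).Nodup := by
  intro n
  induction n with
  | zero => intro j; exact List.nodup_nil
  | succ n ih =>
      intro j
      refine List.nodup_cons.2 ⟨fun h => ?_, ih (j + 1)⟩
      have := pvKeysFrom_bounds n (j + 1) j h
      omega

theorem pvKeysFrom_foldl_max : ∀ (n : Nat) (j a : Int), a ≤ j → n ≠ 0 →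
    (pvKeysFrom j n).foldl max a = j + n - 1 := by
  intro n
  induction n with
  | zero => intro j a _ h; exact absurd rfl h
  | succ n ih =>
      intro j a ha _
      rw [show pvKeysFrom j (n + 1) = j :: pvKeysFrom (j + 1) n from rfl]
      rw [List.foldl_cons, max_eq_right ha]
      rcases Nat.eq_zero_or_pos n with rfl | hn
      · simp [pvKeysFrom]
      · rw [ih (j + 1) j (by omega) (by omega)]
        push_cast
        ring

theorem pvTagG_mem : ∀ (G : List (List String)) (j : Int) (i : Nat) (h : i < G.length),
    ((j + (i : Int)), PySem.Set.ofList G[i]) ∈ pvTagG j G := by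
  intro G
  induction G with
  | nil => intro j i h; cases (Nat.not_lt_zero i h)
  | cons g gs ih =>
      intro j i h
      rcases i with _ | i
      · simp [pvTagG]
      · have hi : i < gs.length := by simpa using h
        have := ih (j + 1) i hi
        rw [show pvTagG j (g :: gs) = (j, PySem.Set.ofList g) :: pvTagG (j + 1) gs from rfl]
        refine List.mem_cons_of_mem _ ?_
        have hcast : j + ((i + 1 : Nat) : Int) = (j + 1) + (i : Int) := by push_cast; ring
        rw [hcast]
        have hidx : (g :: gs)[i + 1] = gs[i] := rfl
        rw [hidx]
        exact this

-- every group B emits is a nonempty set (distinct elements)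
theorem pvBfsB_groups (children : PySem.Dict String (List String)) :
    ∀ (fr : List String) (seen : PySem.Set String) (g : List String),
      g ∈ pvBfsB children fr seen → g ≠ [] ∧ g.Nodup := by
  intro fr seen
  induction fr, seen using pvBfsB.induct children with
  | case1 seen => intro g hg; rw [pvBfsB_nil] at hg; cases hg
  | case2 c rest seen frontier st ih =>
      intro g hg
      rw [pvBfsB_cons] at hg
      rcases List.mem_cons.1 hg with rfl | hg
      · constructor
        · rw [PySem.Set.ofList_cons]
          simp
        · exact PySem.Set.nodup_ofList _
      · exact ih g hg

-- proof-side shorthands for the shared pieces of both ports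
def pvCfold (edges : List (String × String)) : PySem.Dict String (List String) :=
  edges.foldl (fun d e => d.modify e.1 [] (fun l => l ++ [e.2])) PySem.Dict.empty

def pvHp (edges : List (String × String)) : PySem.Set String :=
  edges.foldl (fun s e => PySem.Set.add s e.2) PySem.Set.empty

def pvQ0 (edges : List (String × String)) (ordered : List String) : List String :=
  ordered.filter (fun n => !(PySem.Set.contains (pvHp edges) n))

def pvLv0 (edges : List (String × String)) (ordered : List String) : PySem.Dict String Int :=
  (pvQ0 edges ordered).foldl (fun d n => d.insert n 0) PySem.Dict.empty

def pvQueue0 (nodes : List String) (edges : List (String × String)) : List String :=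
  PySem.List.sorted (((pvGraphInd nodes edges).2.items.filter (fun p => p.2 == 0)).map (fun p => p.1))
    (fun x => x) false

-- unpacking a successful topological sort
theorem pvTopoInv (nodes : List String) (edges : List (String × String)) (ordered : List String)
    (htopo : pvTopoSort nodes edges = some ordered) :
    ∃ res : List String × PySem.Dict String Int,
      pvKahnLoop (pvCfold edges)
          ((nodes.length + edges.length + 1) * (nodes.length + edges.length + 1))
          (pvQueue0 nodes edges) (pvGraphInd nodes edges).2 [] = some res
        ∧ ordered = res.1 := by
  have h1 : (pvGraphInd nodes edges).1 = pvCfold edges := by rw [pvGraphInd_eq]; rfl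
  simp only [pvTopoSort, h1] at htopo
  rcases hk : pvKahnLoop (pvCfold edges)
      ((nodes.length + edges.length + 1) * (nodes.length + edges.length + 1))
      (pvQueue0 nodes edges) (pvGraphInd nodes edges).2 [] with _ | res
  · rw [pvQueue0] at hk
    rw [hk] at htopo
    simp at htopo
  · rw [pvQueue0] at hk
    rw [hk] at htopo
    refine ⟨res, rfl, ?_⟩
    obtain ⟨ord', ind'⟩ := res
    change (if ord'.length = ind'.items.length then some ord' else none) = some ordered at htopo
    split_ifs at htopo with hlen
    exact (Option.some_inj.1 htopo).symm

-- every emitted node lies in the node universe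
theorem pvOrderedSub (nodes : List String) (edges : List (String × String)) (ordered : List String)
    (htopo : pvTopoSort nodes edges = some ordered) :
    ∀ n ∈ ordered, n ∈ pvAllNodes nodes edges := by
  obtain ⟨res, hk, hord⟩ := pvTopoInv nodes edges ordered htopo
  intro n hn
  rw [hord] at hn
  have hmem : n ∈ pvAllNodes nodes edges ↔ (n ∈ nodes ∨ ∃ e ∈ edges, n = e.1 ∨ n = e.2) := by
    rw [pvAllNodes, PySem.Set.mem_ofList, List.mem_append]
    constructor
    · rintro (h | h)
      · exact Or.inl h
      · obtain ⟨e, he, hx⟩ := List.mem_flatMap.1 h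
        rcases List.mem_cons.1 hx with rfl | hx
        · exact Or.inr ⟨e, he, Or.inl rfl⟩
        · rcases List.mem_singleton.1 hx with rfl
          exact Or.inr ⟨e, he, Or.inr rfl⟩
    · rintro (h | ⟨e, he, rfl | rfl⟩)
      · exact Or.inl h
      · exact Or.inr (List.mem_flatMap.2 ⟨e, he, List.mem_cons_self⟩)
      · exact Or.inr (List.mem_flatMap.2 ⟨e, he, List.mem_cons_of_mem _ (List.mem_singleton.2 rfl)⟩)
  rcases pvKahnSub _ _ _ _ _ _ hk n hn with h | h | h
  · cases h
  · -- from the initial queue: a key of the indegree dict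
    have hsorted := (PySem.List.sorted_perm
      (((pvGraphInd nodes edges).2.items.filter (fun p => p.2 == 0)).map (fun p => p.1))
      (fun x => x) false).mem_iff.1 h
    obtain ⟨p, hp, hp1⟩ := List.mem_map.1 hsorted
    have hkey : n ∈ (pvGraphInd nodes edges).2.keys := by
      rw [← hp1, PySem.Dict.keys]
      exact List.mem_map_of_mem (List.mem_of_mem_filter hp)
    have hcont := (PySem.Dict.contains_iff_mem_keys _ n).2 hkey
    rw [pvGraphInd_eq] at hcont
    rw [pvInd_contains] at hcont
    rcases hcont with h' | h'
    · exact hmem.2 (Or.inl ((pvInit_contains nodes n).1 h'))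
    · exact hmem.2 (Or.inr h')
  · -- a stored child: some edge's target
    obtain ⟨e, he, rfl⟩ := pvChildren_values edges n h
    exact hmem.2 (Or.inr ⟨e, he, Or.inr rfl⟩)

-- every parentless node of the universe shows up in A's (and B's) root frontier
theorem pvRootsIn (nodes : List String) (edges : List (String × String)) (ordered : List String)
    (htopo : pvTopoSort nodes edges = some ordered) :
    ∀ r ∈ pvRoots nodes edges, r ∈ pvQ0 edges ordered := by
  obtain ⟨res, hk, hord⟩ := pvTopoInv nodes edges ordered htopo
  intro r hr
  obtain ⟨hrAll, hrRoot⟩ := List.mem_filter.1 hr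
  have hr2 : ∀ e ∈ edges, r ≠ e.2 := by
    intro e he heq
    have : edges.any (fun e => e.2 == r) = true := by
      refine List.any_eq_true.2 ⟨e, he, ?_⟩
      simp [heq]
    rw [this] at hrRoot
    cases hrRoot
  -- r is a key of the indegree dict with value 0
  have hcont : (pvGraphInd nodes edges).2.contains r = true := by
    rw [pvGraphInd_eq, pvInd_contains]
    have := (by
      rw [pvAllNodes, PySem.Set.mem_ofList, List.mem_append] at hrAll
      exact hrAll : r ∈ nodes ∨ r ∈ edges.flatMap (fun e => [e.1, e.2]))
    rcases this with h | h
    · exact Or.inl ((pvInit_contains nodes r).2 h)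
    · obtain ⟨e, he, hx⟩ := List.mem_flatMap.1 h
      rcases List.mem_cons.1 hx with rfl | hx
      · exact Or.inr ⟨e, he, Or.inl rfl⟩
      · rcases List.mem_singleton.1 hx with rfl
        exact Or.inr ⟨e, he, Or.inr rfl⟩
  have hzero : (pvGraphInd nodes edges).2.getD r 0 = 0 := by
    rw [pvGraphInd_eq]
    exact (pvInd_getD_zero r edges _ hr2).trans (pvInit_getD nodes r)
  have hget : (pvGraphInd nodes edges).2.get? r = some 0 := by
    rcases hg : (pvGraphInd nodes edges).2.get? r with _ | v
    · rw [PySem.Dict.contains_eq_isSome_get?, hg] at hcont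
      cases hcont
    · have hv := PySem.Dict.getD_of_get?_eq_some (pvGraphInd nodes edges).2 0 hg
      rw [hv] at hzero
      rw [hzero]
  -- hence r is in the initial Kahn queue, so in ordered
  have hq : r ∈ pvQueue0 nodes edges := by
    rw [pvQueue0]
    refine (PySem.List.sorted_perm _ (fun x => x) false).mem_iff.2 ?_
    refine List.mem_map.2 ⟨(r, 0), ?_, rfl⟩
    refine List.mem_filter.2 ⟨PySem.Dict.mem_items_of_get?_eq_some _ hget, by simp⟩
  have hord' : r ∈ ordered := by
    rw [hord]
    exact pvKahnMem _ _ _ _ _ _ hk r (Or.inr hq)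
  -- and r has no parent
  rw [pvQ0]
  refine List.mem_filter.2 ⟨hord', ?_⟩
  have : ¬ r ∈ pvHp edges := by
    intro hmem
    obtain ⟨e, he, hre⟩ := (pvHasParent_mem edges r).1 hmem
    exact hr2 e he hre
  rcases hc : PySem.Set.contains (pvHp edges) r with _ | _
  · rfl
  · exact absurd ((PySem.Set.contains_iff _ r).1 hc) this

-- under Pre_, A's BFS visits every node the topological sort emitted
theorem pvComplete (nodes : List String) (edges : List (String × String)) (ordered : List String)
    (htopo : pvTopoSort nodes edges = some ordered)
    (hPre : Pre_parallel_execution_groups nodes edges) :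
    ∀ n ∈ ordered,
      (pvBfsA (pvCfold edges) (pvQ0 edges ordered) (pvLv0 edges ordered)).contains n = true := by
  have hkeys0 : (pvLv0 edges ordered).keys = PySem.Set.ofList (pvQ0 edges ordered) := by
    rw [pvLv0, PySem.Dict.keys_foldl_insert (pvQ0 edges ordered) (fun _ _ => (0 : Int)) PySem.Dict.empty]
    rw [PySem.Dict.keys_empty, PySem.Set.update_nil_left]
  have hin0 : ∀ x ∈ pvQ0 edges ordered, (pvLv0 edges ordered).contains x = true := by
    intro x hx
    rw [PySem.Dict.contains_iff_mem_keys, hkeys0, PySem.Set.mem_ofList]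
    exact hx
  have hout0 : ∀ x, (pvLv0 edges ordered).contains x = true → x ∈ pvQ0 edges ordered := by
    intro x hx
    rw [PySem.Dict.contains_iff_mem_keys, hkeys0, PySem.Set.mem_ofList] at hx
    exact hx
  have hclosed := pvBfsA_closed (pvCfold edges) (pvQ0 edges ordered) (pvLv0 edges ordered)
    hin0 (fun x hx => Or.inl (hout0 x hx))
  have hcl : ∀ x, (pvBfsA (pvCfold edges) (pvQ0 edges ordered) (pvLv0 edges ordered)).contains x = true →
      ∀ c ∈ pvSuccsOf edges x,
        (pvBfsA (pvCfold edges) (pvQ0 edges ordered) (pvLv0 edges ordered)).contains c = true := by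
    intro x hx c hc
    refine hclosed x hx c ?_
    rw [show (pvCfold edges).getD x [] = pvSuccsOf edges x from pvChildren_getD edges x]
    exact hc
  have hroot : ∀ r ∈ PySem.Set.ofList (pvRoots nodes edges),
      (pvBfsA (pvCfold edges) (pvQ0 edges ordered) (pvLv0 edges ordered)).contains r = true := by
    intro r hr
    have := pvRootsIn nodes edges ordered htopo r ((PySem.Set.mem_ofList _ r).1 hr)
    exact pvBfsA_mono (pvCfold edges) _ _ r (hin0 r this)
  intro n hn
  have hAll := pvOrderedSub nodes edges ordered htopo n hn
  have hsat := hPre.2 n hAll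
  exact pvSaturMin edges
    (fun x => (pvBfsA (pvCfold edges) (pvQ0 edges ordered) (pvLv0 edges ordered)).contains x = true)
    ((pvAllNodes nodes edges).length + 1) _ hroot hcl n hsat

theorem pvTagG_length : ∀ (G : List (List String)) (j : Int), (pvTagG j G).length = G.length := by
  intro G
  induction G with
  | nil => intro j; rfl
  | cons g gs ih => intro j; simp [pvTagG, ih]

-- the level dict A computes is exactly B's group list, tagged with levels
theorem pvLevelTag (edges : List (String × String)) (ordered : List String) :
    (pvBfsA (pvCfold edges) (pvQ0 edges ordered) (pvLv0 edges ordered)).items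
      = pvTag 0 (pvBfsB (pvCfold edges) (pvQ0 edges ordered) (PySem.Set.ofList (pvQ0 edges ordered))) := by
  have hitems0 : (pvLv0 edges ordered).items
      = (PySem.Set.ofList (pvQ0 edges ordered)).map (fun n => (n, (0 : Int))) := by
    rw [pvLv0]
    rw [pvInsertZeroItems (pvQ0 edges ordered) PySem.Dict.empty [] rfl]
    rw [PySem.Set.update_nil_left]
  have hkeys0 : (pvLv0 edges ordered).keys = PySem.Set.ofList (pvQ0 edges ordered) := by
    rw [pvLv0, PySem.Dict.keys_foldl_insert (pvQ0 edges ordered) (fun _ _ => (0 : Int)) PySem.Dict.empty]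
    rw [PySem.Dict.keys_empty, PySem.Set.update_nil_left]
  have hnd0 : (pvLv0 edges ordered).keys.Nodup := by
    rw [hkeys0]; exact PySem.Set.nodup_ofList _
  have hC0 : ∀ x, (pvLv0 edges ordered).contains x
      = PySem.Set.contains (PySem.Set.ofList (pvQ0 edges ordered)) x := by
    intro x
    rcases hc : PySem.Set.contains (PySem.Set.ofList (pvQ0 edges ordered)) x with _ | _
    · rcases hl : (pvLv0 edges ordered).contains x with _ | _
      · rfl
      · have := (PySem.Dict.contains_iff_mem_keys _ x).1 hl
        rw [hkeys0] at this
        rw [(PySem.Set.contains_iff _ x).2 this] at hc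
        cases hc
    · have := (PySem.Set.contains_iff _ x).1 hc
      rw [PySem.Dict.contains_iff_mem_keys, hkeys0]
      exact this
  have hq0get : ∀ x ∈ pvQ0 edges ordered, (pvLv0 edges ordered).get? x = some 0 := by
    intro x hx
    apply PySem.Dict.get?_of_mem_items _ _ hnd0
    rw [hitems0]
    exact List.mem_map_of_mem ((PySem.Set.mem_ofList _ x).2 hx)
  have hmaster := pvMaster (pvCfold edges) _ (pvQ0 edges ordered) (pvLv0 edges ordered)
    (PySem.Set.ofList (pvQ0 edges ordered)) 0 (le_refl _) hC0 hnd0 hq0get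
  rcases hq0 : pvQ0 edges ordered with _ | ⟨c, rest⟩
  · have hlv0 : pvLv0 edges ordered = PySem.Dict.empty := by rw [pvLv0, hq0]; rfl
    rw [hlv0, pvBfsA_nil, pvBfsB_nil]
    rfl
  · rw [hq0] at hmaster hitems0
    rw [pvBfsB_cons, hmaster, hitems0]
    rfl


-- ===== VERDICT (by name: the statement is the Claim_ definition above) =====
theorem parallel_execution_groups_spec : Claim_equal_parallel_execution_groups := by
  intro nodes edges _hDom hPre
  show parallel_execution_groups nodes edges = parallel_execution_groups_alt nodes edges
  rcases htopo : pvTopoSort nodes edges with _ | ordered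
  · simp only [parallel_execution_groups, parallel_execution_groups_alt, htopo]
  · simp only [parallel_execution_groups, parallel_execution_groups_alt, htopo]
    simp only [pvChildrenSeen_eq]
    rw [pvLq_eq]
    rw [show (edges.foldl (fun d e => d.modify e.1 [] (fun l => l ++ [e.2])) PySem.Dict.empty)
        = pvCfold edges from rfl]
    rw [show (edges.foldl (fun s e => PySem.Set.add s e.2) PySem.Set.empty) = pvHp edges from rfl]
    rw [show ordered.filter (fun n => !(PySem.Set.contains (pvHp edges) n)) = pvQ0 edges ordered from rfl]
    rw [show (pvQ0 edges ordered).foldl (fun d n => d.insert n 0) PySem.Dict.empty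
        = pvLv0 edges ordered from rfl]
    rw [pvLeftoverId ordered (pvBfsA (pvCfold edges) (pvQ0 edges ordered) (pvLv0 edges ordered))
      (pvComplete nodes edges ordered htopo hPre)]
    rw [pvLevelTag edges ordered]
    have hGne := pvBfsB_groups (pvCfold edges) (pvQ0 edges ordered) (PySem.Set.ofList (pvQ0 edges ordered))
    rcases hg : pvBfsB (pvCfold edges) (pvQ0 edges ordered) (PySem.Set.ofList (pvQ0 edges ordered)) with _ | ⟨g, gs⟩
    · rfl
    · rw [hg] at hGne
      have hgi := pvBucket (g :: gs) 0 PySem.Dict.empty (fun g' hg' => (hGne g' hg').1)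
        (fun i _ => rfl)
      rw [show (PySem.Dict.empty : PySem.Dict Int (PySem.Set String)).items = [] from rfl,
        List.nil_append] at hgi
      have hknd : (List.foldl (fun (d : PySem.Dict Int (PySem.Set String)) p =>
          d.insert p.2 (PySem.Set.add (d.getD p.2 PySem.Set.empty) p.1)) PySem.Dict.empty
          (pvTag 0 (g :: gs))).keys.Nodup := by
        rw [PySem.Dict.keys, hgi, pvTagG_keys]
        exact pvKeysFrom_nodup _ _
      have hmax : PySem.List.max? (List.foldl (fun (d : PySem.Dict Int (PySem.Set String)) p =>
          d.insert p.2 (PySem.Set.add (d.getD p.2 PySem.Set.empty) p.1)) PySem.Dict.empty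
          (pvTag 0 (g :: gs))).keys (fun x => x) = some ((gs.length : Int)) := by
        have hkeq : (List.foldl (fun (d : PySem.Dict Int (PySem.Set String)) p =>
            d.insert p.2 (PySem.Set.add (d.getD p.2 PySem.Set.empty) p.1)) PySem.Dict.empty
            (pvTag 0 (g :: gs))).keys = pvKeysFrom 0 (gs.length + 1) := by
          rw [PySem.Dict.keys, hgi, pvTagG_keys]
          rfl
        rw [hkeq]
        rw [show pvKeysFrom 0 (gs.length + 1) = 0 :: pvKeysFrom 1 gs.length from rfl]
        rw [PySem.List.max?_id_cons]
        rcases Nat.eq_zero_or_pos gs.length with hz | hpos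
        · rw [hz]
          simp [pvKeysFrom]
        · rw [pvKeysFrom_foldl_max gs.length 1 0 (by omega) (by omega)]
          congr 1
          omega
      rw [hgi, if_neg (by rw [pvTagG_length]; simp), hmax]
      show (PySem.List.pyRange 0 ((gs.length : Int) + 1)).map (fun i =>
          ((List.foldl (fun (d : PySem.Dict Int (PySem.Set String)) p =>
            d.insert p.2 (PySem.Set.add (d.getD p.2 PySem.Set.empty) p.1)) PySem.Dict.empty
            (pvTag 0 (g :: gs))).getD i PySem.Set.empty : List String)) = g :: gs
      rw [show ((gs.length : Int) + 1) = ((gs.length + 1 : Nat) : Int) by push_cast; ring]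
      rw [PySem.List.pyRange_zero_natCast]
      rw [List.map_map]
      apply List.ext_getElem
      · simp
      · intro i h1 h2
        simp only [List.getElem_map, List.getElem_range, Function.comp]
        have h2' : i < (g :: gs).length := by simpa using h2
        have hm := pvTagG_mem (g :: gs) 0 i h2'
        rw [show (0 : Int) + (i : Int) = (i : Int) by ring] at hm
        rw [← hgi] at hm
        rw [PySem.Dict.getD_of_mem_items _ hm hknd PySem.Set.empty]
        exact PySem.Set.ofList_eq_self_of_nodup _ ((hGne _ (List.getElem_mem h2')).2)
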